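-- pv_equiv track=rewrite | github.com/cbizon/metapath-counts | src/library/aggregation.py | parse_metapath
-- ===== SOURCE A (Python) =====
-- from typing import Callable, Iterator, List, Tuple
--
-- def parse_metapath(metapath: str) -> Tuple[List[str], List[str], List[str]]:
--     """
--     Parse a metapath into node types, predicates, and directions.
--
--     Metapath format: Type1|pred1|dir1|Type2|pred2|dir2|...|TypeN
--     - N-hop path has N+1 node types, N predicates, N directions
--     - Number of parts = 1 + 3*N (for N hops)
--
--     Examples:
--         1-hop: "A|pred1|F|B" -> nodes=['A', 'B'], predicates=['pred1'], directions=['F']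
--         2-hop: "A|p1|F|B|p2|R|C" -> nodes=['A', 'B', 'C'], predicates=['p1', 'p2'], directions=['F', 'R']
--         3-hop: "A|p1|F|B|p2|R|C|p3|F|D" -> nodes=['A', 'B', 'C', 'D'], ...
--
--     Args:
--         metapath: Pipe-separated metapath string
--
--     Returns:
--         Tuple of (nodes, predicates, directions)
--
--     Raises:
--         ValueError: If metapath format is invalid
--     """
--     parts = metapath.split('|')
--     num_parts = len(parts)
--
--     # Formula: num_parts = 1 + 3*n_hops
--     # So: n_hops = (num_parts - 1) / 3
--     if (num_parts - 1) % 3 != 0 or num_parts < 4: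
--         raise ValueError(f"Invalid metapath format: {metapath} (parts: {num_parts}, expected 1+3*N)")
--
--     n_hops = (num_parts - 1) // 3
--
--     # Extract nodes: positions 0, 3, 6, 9, ... (every 3rd starting at 0)
--     nodes = [parts[i * 3] for i in range(n_hops + 1)]
--
--     # Extract predicates: positions 1, 4, 7, 10, ... (every 3rd starting at 1)
--     predicates = [parts[i * 3 + 1] for i in range(n_hops)]
--
--     # Extract directions: positions 2, 5, 8, 11, ... (every 3rd starting at 2)
--     directions = [parts[i * 3 + 2] for i in range(n_hops)]
--
--     return nodes, predicates, directions
-- ===== SOURCE B (Python) =====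
-- def parse_metapath(metapath):
--     parts = metapath.split('|')
--     num_parts = len(parts)
--     if (num_parts - 1) % 3 != 0 or num_parts < 4:
--         raise ValueError(f"Invalid metapath format: {metapath} (parts: {num_parts}, expected 1+3*N)")
--     nodes, predicates, directions = [], [], []
--     for i, part in enumerate(parts):
--         if i % 3 == 0:
--             nodes.append(part)
--         elif i % 3 == 1:
--             predicates.append(part)
--         else:
--             directions.append(part)
--     return nodes, predicates, directions
-- ===== Notes on version B (the rewrite author's own statement) =====
-- stated objective: simpler
-- what changed: Replaces the three strided index-comprehensions (and the n_hops arithmetic) with a single enumerate pass that partitions every part by i % 3.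
import Mathlib
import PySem

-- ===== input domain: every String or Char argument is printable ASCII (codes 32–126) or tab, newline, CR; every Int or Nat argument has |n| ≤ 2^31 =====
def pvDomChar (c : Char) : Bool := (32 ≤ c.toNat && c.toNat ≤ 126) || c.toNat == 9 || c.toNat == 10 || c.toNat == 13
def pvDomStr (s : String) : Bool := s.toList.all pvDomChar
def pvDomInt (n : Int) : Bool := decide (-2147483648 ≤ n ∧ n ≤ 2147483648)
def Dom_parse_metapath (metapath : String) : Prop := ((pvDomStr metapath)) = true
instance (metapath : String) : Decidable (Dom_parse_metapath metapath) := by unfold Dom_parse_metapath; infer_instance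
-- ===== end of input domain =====

-- B replaces A's three strided index-comprehensions with one enumerate pass partitioning by i % 3 (objective: simpler).

-- ===== PORT A =====
-- split? is some (sep "|" ≠ ""); parts[i*3] etc. are always in range under Pre_; List.getD is exact there.
-- On the ValueError branch (excluded by Pre_) the port returns ([], [], []).
def parse_metapath (metapath : String) : List String × List String × List String :=
  let parts := (PySem.Str.split? metapath "|").getD []
  let num_parts := parts.length
  if (num_parts - 1) % 3 ≠ 0 ∨ num_parts < 4 then ([], [], [])
  else
    let n_hops := (num_parts - 1) / 3
    let nodes := (List.range (n_hops + 1)).map (fun i => parts.getD (i * 3) "")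
    let predicates := (List.range n_hops).map (fun i => parts.getD (i * 3 + 1) "")
    let directions := (List.range n_hops).map (fun i => parts.getD (i * 3 + 2) "")
    (nodes, predicates, directions)

-- ===== PORT B =====
-- B's `for i, part in enumerate(parts)` loop with three append targets, as structural recursion.
def pvLoopB : List String → Nat → (List String × List String × List String) →
    List String × List String × List String
  | [], _, acc => acc
  | part :: rest, i, (nodes, predicates, directions) =>
    if i % 3 = 0 then pvLoopB rest (i + 1) (nodes ++ [part], predicates, directions)
    else if i % 3 = 1 then pvLoopB rest (i + 1) (nodes, predicates ++ [part], directions)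
    else pvLoopB rest (i + 1) (nodes, predicates, directions ++ [part])

def parse_metapath_alt (metapath : String) : List String × List String × List String :=
  let parts := (PySem.Str.split? metapath "|").getD []
  let num_parts := parts.length
  if (num_parts - 1) % 3 ≠ 0 ∨ num_parts < 4 then ([], [], [])
  else pvLoopB parts 0 ([], [], [])

-- ===== PRECONDITION & SPEC =====
-- Pre_ excludes exactly the inputs where the Python raises ValueError (part count not of the form 1 + 3*N or < 4).
def Pre_parse_metapath (metapath : String) : Prop :=
  (((PySem.Str.split? metapath "|").getD []).length - 1) % 3 = 0 ∧ 4 ≤ ((PySem.Str.split? metapath "|").getD []).length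
instance (metapath : String) : Decidable (Pre_parse_metapath metapath) := by unfold Pre_parse_metapath; infer_instance

def pvWitness_parse_metapath : String := "A|p|F|B"

def Spec_parse_metapath (metapath : String) (out : List String × List String × List String) : Prop := out = parse_metapath_alt metapath
instance (metapath : String) (out : List String × List String × List String) : Decidable (Spec_parse_metapath metapath out) := by unfold Spec_parse_metapath; infer_instance

-- ===== CLAIM (what is proved, stated in full; the proofs are below) =====
def Claim_equal_parse_metapath : Prop := ∀ (metapath : String), Dom_parse_metapath metapath → Pre_parse_metapath metapath → Spec_parse_metapath metapath (parse_metapath metapath)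

-- ===== LEMMAS AND PROOFS =====

-- One 3-chunk of B's loop lands the three parts in the three accumulators.
theorem pvLoopB_chunk (x y z : String) (rest : List String) (i : Nat) (a b c : List String)
    (h : i % 3 = 0) :
    pvLoopB (x :: y :: z :: rest) i (a, b, c)
      = pvLoopB rest (i + 3) (a ++ [x], b ++ [y], c ++ [z]) := by
  simp only [pvLoopB, h]
  have h1 : (i + 1) % 3 = 1 := by omega
  have h2 : (i + 2) % 3 = 2 := by omega
  simp [h1, h2]

-- Characterisation of B's loop on a list of length 3*h+1, starting at an index ≡ 0 (mod 3).
theorem pvLoopB_spec (h : Nat) : ∀ (ps : List String) (i : Nat) (a b c : List String),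
    ps.length = 3 * h + 1 → i % 3 = 0 →
    pvLoopB ps i (a, b, c)
      = (a ++ (List.range (h + 1)).map (fun j => ps.getD (j * 3) ""),
         b ++ (List.range h).map (fun j => ps.getD (j * 3 + 1) ""),
         c ++ (List.range h).map (fun j => ps.getD (j * 3 + 2) "")) := by
  induction h with
  | zero =>
    intro ps i a b c hlen hi
    match ps, hlen with
    | [x], _ => simp [pvLoopB, hi]
  | succ k ih =>
    intro ps i a b c hlen hi
    match ps, hlen with
    | x :: y :: z :: rest, hlen =>
      have hrest : rest.length = 3 * k + 1 := by simp at hlen; omega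
      rw [pvLoopB_chunk x y z rest i a b c hi,
          ih rest (i + 3) (a ++ [x]) (b ++ [y]) (c ++ [z]) hrest (by omega)]
      refine Prod.ext ?_ (Prod.ext ?_ ?_) <;>
        simp [List.range_succ_eq_map, List.map_map, Function.comp,
              Nat.succ_mul, List.append_assoc]

-- ===== VERDICT (by name: the statement is the Claim_ definition above) =====
theorem parse_metapath_spec : Claim_equal_parse_metapath := by
  intro metapath _ hpre
  obtain ⟨hmod, hlen⟩ := hpre
  unfold Spec_parse_metapath parse_metapath parse_metapath_alt
  set ps := (PySem.Str.split? metapath "|").getD [] with hps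
  have hguard : ¬ ((ps.length - 1) % 3 ≠ 0 ∨ ps.length < 4) := by omega
  simp only [if_neg hguard]
  have hform : ps.length = 3 * ((ps.length - 1) / 3) + 1 := by omega
  rw [pvLoopB_spec ((ps.length - 1) / 3) ps 0 [] [] [] hform rfl]
  simp
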